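-- pv_equiv track=rewrite | github.com/Shalinivel/Python_practise | unique_devices.py | deviceNamesytem
-- ===== SOURCE A (Python) =====
-- def deviceNamesytem(devicenames):
--     dico={}
--     result=[]
--
--     for item in devicenames:
--         if item in dico.keys():
--             dico[item]+=1
--             result.append(f"{item}{dico[item]}")
--         else:
--             dico[item]=0
--             result.append(f"{item}")
--     return(result)
-- ===== SOURCE B (Python) =====
-- def deviceNamesytem(devicenames):
--     positions = {}
--     for i, name in enumerate(devicenames):
--         positions.setdefault(name, []).append(i)
--     result = [""] * len(devicenames)
--     for name, idxs in positions.items():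
--         for j, i in enumerate(idxs):
--             result[i] = name if j == 0 else f"{name}{j}"
--     return result
-- ===== Notes on version B (the rewrite author's own statement) =====
-- stated objective: alternative
-- what changed: Replaces A's single scan with a running counter by two staged passes: first build an index of each name's ordered occurrence positions, then pre-allocate the output and fill it name-by-name, writing the bare name at the first position and name+j at later ones.
import Mathlib
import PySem

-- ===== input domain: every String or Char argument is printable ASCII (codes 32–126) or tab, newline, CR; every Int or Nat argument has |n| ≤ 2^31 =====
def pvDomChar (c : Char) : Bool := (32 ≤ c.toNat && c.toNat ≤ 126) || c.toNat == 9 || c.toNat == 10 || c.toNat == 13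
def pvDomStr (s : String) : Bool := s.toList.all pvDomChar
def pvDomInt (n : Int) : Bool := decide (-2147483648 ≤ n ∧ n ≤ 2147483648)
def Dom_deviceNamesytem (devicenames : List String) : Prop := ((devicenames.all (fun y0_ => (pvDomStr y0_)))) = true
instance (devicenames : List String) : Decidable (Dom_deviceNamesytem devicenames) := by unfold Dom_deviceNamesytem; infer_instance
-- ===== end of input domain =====

-- B replaces A's single running-counter scan with two staged passes: build an index name -> occurrence positions, then pre-allocate the output and fill it name-by-name (alternative decomposition, not faster).


-- ===== PORT A =====
def deviceNamesytem (devicenames : List String) : List String :=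
  (devicenames.foldl
    (fun (st : PySem.Dict String Int × List String) item =>
      if st.1.contains item then
        let d := st.1.modify item 0 (· + 1)
        (d, st.2 ++ [item ++ PySem.Int.toStr (d.getD item 0)])
      else
        (st.1.insert item 0, st.2 ++ [item]))
    (PySem.Dict.empty, [])).2

-- ===== PORT B =====
-- first pass 'positions.setdefault(name, []).append(i)' is Dict.modify name [] (· ++ [i]) (exact: append to the value, key position kept);
-- inner fill loop 'for j, i in enumerate(idxs): result[i] = name if j == 0 else f"{name}{j}"'
def pvFillB (name : String) : Int → List Int → List String → List String
  | _, [], res => res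
  | j, i :: rest, res =>
      pvFillB name (j + 1) rest
        (PySem.List.pySetD res i (if j = 0 then name else name ++ PySem.Int.toStr j))

def deviceNamesytem_alt (devicenames : List String) : List String :=
  ((PySem.List.enumerate devicenames).foldl
      (fun d p => d.modify p.2 ([] : List Int) (· ++ [p.1])) PySem.Dict.empty).items.foldl
    (fun res p => pvFillB p.1 0 p.2 res) (List.replicate devicenames.length "")

-- ===== PRECONDITION & SPEC =====
def Spec_deviceNamesytem (devicenames : List String) (out : List String) : Prop := out = deviceNamesytem_alt devicenames
instance (devicenames : List String) (out : List String) : Decidable (Spec_deviceNamesytem devicenames out) := by unfold Spec_deviceNamesytem; infer_instance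

-- ===== CLAIM (what is proved, stated in full; the proofs are below) =====
def Claim_equal_deviceNamesytem : Prop := ∀ (devicenames : List String), Dom_deviceNamesytem devicenames → Spec_deviceNamesytem devicenames (deviceNamesytem devicenames)

-- ===== LEMMAS AND PROOFS =====

/-- The output element for a name occurring for the (j-th) time (j = 0 bare). -/
def outB (c : String) (j : Int) : String := if j = 0 then c else c ++ PySem.Int.toStr j

/-- Reference result: element i is its name suffixed by the count of that name in the prefix. -/
def refList (l : List String) : List String :=
  (List.range l.length).map (fun i => outB (l.getD i "") (((l.take i).count (l.getD i "") : Int)))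

/-- A's per-element behaviour, threaded down the list with the processed prefix. -/
def bgo : List String → List String → List String
  | _, [] => []
  | pre, x :: rest => outB x ((pre.count x : Int)) :: bgo (pre ++ [x]) rest

theorem a_go (rest : List String) : ∀ (pre : List String) (d : PySem.Dict String Int) (res : List String),
    (∀ x, d.contains x = decide (0 < pre.count x)) →
    (∀ x, 0 < pre.count x → d.getD x 0 = (pre.count x : Int) - 1) →
    (rest.foldl
      (fun (st : PySem.Dict String Int × List String) item =>
        if st.1.contains item then
          let d := st.1.modify item 0 (· + 1)
          (d, st.2 ++ [item ++ PySem.Int.toStr (d.getD item 0)])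
        else
          (st.1.insert item 0, st.2 ++ [item]))
      (d, res)).2 = res ++ bgo pre rest := by
  induction rest with
  | nil => intro pre d res _ _; simp [bgo]
  | cons x rest ih =>
    intro pre d res h1 h2
    rw [List.foldl_cons, bgo]
    by_cases hc : 0 < pre.count x
    · have hcx : d.contains x = true := by rw [h1]; simp [hc]
      simp only [hcx, if_true]
      have hgd : (d.modify x 0 (· + 1)).getD x 0 = (pre.count x : Int) := by
        rw [PySem.Dict.getD_modify_self, h2 x hc]; ring
      rw [ih (pre ++ [x])]
      · have hne : pre.count x ≠ 0 := by omega
        simp [outB, hgd, hne]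
      · intro y
        rw [PySem.Dict.contains_modify, h1]
        by_cases hyx : y = x
        · subst hyx; simp [List.count_append]
        · simp [List.count_append, hyx, Ne.symm hyx]
      · intro y hy
        rw [PySem.Dict.getD_modify]
        by_cases hyx : y = x
        · subst hyx; simp [h2 y hc, List.count_append]
        · simp only [if_neg hyx]
          have hcy : 0 < pre.count y := by
            have h' : y ∈ pre := by simpa [List.count_append, Ne.symm hyx] using hy
            exact List.count_pos_iff.mpr h'
          rw [h2 y hcy]
          congr 2
          simp [List.count_append, Ne.symm hyx]
    · have hcx : d.contains x = false := by rw [h1]; simp [hc]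
      simp only [hcx, Bool.false_eq_true, if_false]
      rw [ih (pre ++ [x])]
      · have hz : pre.count x = 0 := by omega
        simp [outB, hz]
      · intro y
        rw [PySem.Dict.contains_insert, h1]
        by_cases hyx : y = x
        · subst hyx; simp [List.count_append]
        · simp [List.count_append, hyx, Ne.symm hyx]
      · intro y hy
        by_cases hyx : y = x
        · subst hyx
          rw [PySem.Dict.getD_insert_self]
          have hz : pre.count y = 0 := by omega
          simp [List.count_append, hz]
        · rw [PySem.Dict.getD_insert_of_ne]
          · have hcy : 0 < pre.count y := by
              have h' : y ∈ pre := by simpa [List.count_append, Ne.symm hyx] using hy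
              exact List.count_pos_iff.mpr h'
            rw [h2 y hcy]
            congr 2
            simp [List.count_append, Ne.symm hyx]
          · exact hyx

theorem bgo_eq_map (l : List String) : ∀ (pre : List String),
    bgo pre l = (List.range l.length).map
      (fun i => outB (l.getD i "") (((pre ++ l.take i).count (l.getD i "") : Int))) := by
  induction l with
  | nil => intro pre; simp [bgo]
  | cons x rest ih =>
    intro pre
    rw [bgo, ih (pre ++ [x])]
    rw [List.length_cons, List.range_succ_eq_map, List.map_cons, List.map_map]
    congr 1
    · simp
    · apply List.map_congr_left
      intro i _
      simp [List.count_append, List.append_assoc]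

theorem a_eq_ref (l : List String) : deviceNamesytem l = refList l := by
  unfold deviceNamesytem refList
  rw [a_go l [] PySem.Dict.empty []
      (by intro x; simp [PySem.Dict.contains_empty])
      (by intro x hx; simp at hx)]
  rw [bgo_eq_map l []]
  simp

/-- Positions (as Nat) at which name c occurs in l. -/
def ksOf (l : List String) (c : String) : List Nat :=
  (List.range l.length).filter (fun k => l.getD k "" == c)

/-- What B's first pass stores for key c. -/
def idxsOf (l : List String) (c : String) : List Int :=
  ((PySem.List.enumerate l).filter (fun p => p.2 == c)).map (·.1)

theorem build_getD (ps : List (Int × String)) : ∀ (d : PySem.Dict String (List Int)) (c : String),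
    (ps.foldl (fun d p => d.modify p.2 ([] : List Int) (· ++ [p.1])) d).getD c [] =
      d.getD c [] ++ (ps.filter (fun p => p.2 == c)).map (·.1) := by
  induction ps with
  | nil => intro d c; simp
  | cons p ps ih =>
    intro d c
    rw [List.foldl_cons, ih]
    by_cases h : p.2 = c
    · simp [h]
    · simp [h, Ne.symm h, PySem.Dict.getD_modify]

theorem build_keys (ps : List (Int × String)) :
    (ps.foldl (fun d p => d.modify p.2 ([] : List Int) (· ++ [p.1])) PySem.Dict.empty).keys =
      PySem.Set.ofList (ps.map (·.2)) := by
  have h := PySem.Dict.keys_foldl_modify_key ps Prod.snd ([] : List Int)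
    (fun _ p => (· ++ [p.1])) PySem.Dict.empty
  rw [h, PySem.Dict.keys_empty, PySem.Set.update_nil_left]

theorem build_nodup (ps : List (Int × String)) :
    (ps.foldl (fun d p => d.modify p.2 ([] : List Int) (· ++ [p.1])) PySem.Dict.empty).keys.Nodup :=
  PySem.Dict.nodup_keys_foldl_modify_key ps Prod.snd ([] : List Int)
    (fun _ p => (· ++ [p.1])) PySem.Dict.empty (by simp [PySem.Dict.keys_empty])

theorem idxsOf_eq (l : List String) (c : String) :
    idxsOf l c = (ksOf l c).map (fun (k : Nat) => (k : Int)) := by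
  unfold idxsOf ksOf
  rw [PySem.List.enumerate_eq_map_pyRange l ""]
  rw [show PySem.List.len l = ((l.length : Int)) from rfl, PySem.List.pyRange_zero_natCast]
  rw [List.map_map, List.filter_map, List.map_map]
  rw [List.filter_congr (l := List.range l.length)
      (q := fun k => l.getD k "" == c) (by intro k _; simp [Function.comp])]
  rfl

theorem ksOf_nodup (l : List String) (c : String) : (ksOf l c).Nodup :=
  (List.nodup_range).filter _

theorem mem_ksOf (l : List String) (c : String) (i : Nat) (hi : i < l.length)
    (hc : l.getD i "" = c) : i ∈ ksOf l c := by
  unfold ksOf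
  rw [List.mem_filter, List.mem_range]
  exact ⟨hi, by rw [hc]; simp⟩

theorem mem_ksOf_elim (l : List String) (c : String) (k : Nat) (hk : k ∈ ksOf l c) :
    k < l.length ∧ l.getD k "" = c := by
  unfold ksOf at hk
  rw [List.mem_filter, List.mem_range] at hk
  exact ⟨hk.1, by simpa using hk.2⟩

theorem pvFillB_length (c : String) (js : List Int) : ∀ (j : Int) (res : List String),
    (pvFillB c j js res).length = res.length := by
  induction js with
  | nil => intro j res; rfl
  | cons x rest ih => intro j res; rw [pvFillB, ih, PySem.List.length_pySetD]

theorem pvFillB_untouched (c : String) (js : List Int) : ∀ (j : Int) (res : List String) (i : Nat),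
    (∀ x ∈ js, ∃ k : Nat, x = (k : Int) ∧ k ≠ i) →
    (pvFillB c j js res).getD i "" = res.getD i "" := by
  induction js with
  | nil => intro j res i _; rfl
  | cons x rest ih =>
    intro j res i h
    obtain ⟨k, hxk, hki⟩ := h x (List.mem_cons_self ..)
    rw [pvFillB, ih _ _ _ (fun y hy => h y (List.mem_cons_of_mem _ hy))]
    subst hxk
    simp [PySem.List.pySetD_natCast, List.getD, List.getElem?_set_ne hki]

theorem pvFillB_hit (c : String) (ks : List Nat) : ∀ (j0 : Int) (res : List String) (i : Nat),
    ks.Nodup → i ∈ ks → i < res.length →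
    (pvFillB c j0 (ks.map (fun (k : Nat) => (k : Int))) res).getD i "" = outB c (j0 + (ks.idxOf i : Int)) := by
  induction ks with
  | nil => intro _ _ _ _ h _; simp at h
  | cons k rest ih =>
    intro j0 res i hnd hmem hlen
    rw [List.map_cons, pvFillB]
    by_cases hk : i = k
    · subst hk
      have hni : i ∉ rest := (List.nodup_cons.mp hnd).1
      rw [pvFillB_untouched]
      · rw [List.idxOf_cons_self]
        simp only [PySem.List.pySetD_natCast, List.getD]
        rw [List.getElem?_set_self hlen]
        simp [outB]
      · intro x hx
        obtain ⟨m, hm, rfl⟩ := List.mem_map.mp hx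
        exact ⟨m, rfl, fun h => hni (h ▸ hm)⟩
    · have hmem' : i ∈ rest := by
        rcases List.mem_cons.mp hmem with h | h
        · exact absurd h hk
        · exact h
      rw [ih (j0 + 1) _ i (List.nodup_cons.mp hnd).2 hmem'
          (by rw [PySem.List.length_pySetD]; exact hlen)]
      rw [List.idxOf_cons_ne _ (fun h => hk h.symm)]
      congr 1
      push_cast
      ring

theorem fold_fill (l : List String) (i : Nat) (hi : i < l.length) (ns : List String) :
    ∀ (res : List String), res.length = l.length →
    (ns.foldl (fun r c => pvFillB c 0 (idxsOf l c) r) res).getD i "" =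
      if l.getD i "" ∈ ns then
        outB (l.getD i "") (((l.take i).count (l.getD i "") : Int))
      else res.getD i "" := by
  induction ns with
  | nil => intro res _; simp
  | cons c ns ih =>
    intro res hlen
    rw [List.foldl_cons]
    have hlen' : (pvFillB c 0 (idxsOf l c) res).length = l.length := by
      rw [pvFillB_length]; exact hlen
    rw [ih _ hlen']
    by_cases hc : l.getD i "" = c
    · have hfill : (pvFillB c 0 (idxsOf l c) res).getD i "" =
          outB (l.getD i "") (((l.take i).count (l.getD i "") : Int)) := by
        rw [idxsOf_eq, pvFillB_hit c (ksOf l c) 0 res i (ksOf_nodup l c)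
            (mem_ksOf l c i hi hc) (by omega)]
        rw [hc, zero_add]
        congr 2
        -- rank of i in ksOf l c = count of c in the prefix before i
        unfold ksOf
        have hsplit : l.length = (i + 1) + (l.length - i - 1) := by omega
        rw [hsplit, List.range_add, List.filter_append, List.idxOf_append, List.range_succ,
            List.filter_append]
        have hci : (List.filter (fun k => l.getD k "" == c) [i]) = [i] := by
          rw [List.filter_singleton, hc]; simp
        rw [hci]
        have hmem : i ∈ List.filter (fun k => l.getD k "" == c) (List.range i) ++ [i] := by
          simp
        rw [if_pos hmem, List.idxOf_append]
        have hnotmem : i ∉ List.filter (fun k => l.getD k "" == c) (List.range i) := by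
          intro h
          have := List.mem_range.mp (List.mem_of_mem_filter h)
          omega
        rw [if_neg hnotmem, List.idxOf_cons_self, Nat.zero_add]
        -- count in take i = length of filtered range i
        have htake : l.take i = (List.range i).map (fun k => l.getD k "") := by
          apply List.ext_getElem
          · simp; omega
          · intro k hk1 hk2
            simp only [List.getElem_take, List.getElem_map, List.getElem_range]
            rw [List.getD_eq_getElem l "" (by simp at hk1; omega)]
        rw [htake, List.count_eq_countP, List.countP_map, List.countP_eq_length_filter]
        rfl
      by_cases hmem : l.getD i "" ∈ ns
      · rw [if_pos hmem, if_pos (List.mem_cons.mpr (Or.inr hmem))]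
      · rw [if_neg hmem, hfill, if_pos (List.mem_cons.mpr (Or.inl hc))]
    · have huntouched : (pvFillB c 0 (idxsOf l c) res).getD i "" = res.getD i "" := by
        rw [idxsOf_eq]
        apply pvFillB_untouched
        intro x hx
        obtain ⟨m, hm, rfl⟩ := List.mem_map.mp hx
        refine ⟨m, rfl, fun h => ?_⟩
        subst h
        exact hc (mem_ksOf_elim l c m hm).2
      by_cases hmem : l.getD i "" ∈ ns
      · rw [if_pos hmem, if_pos (List.mem_cons.mpr (Or.inr hmem))]
      · rw [if_neg hmem, huntouched,
            if_neg (fun h => (List.mem_cons.mp h).elim (fun h' => hc h') hmem)]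

theorem b_eq_ref (l : List String) : deviceNamesytem_alt l = refList l := by
  unfold deviceNamesytem_alt
  set pos := (PySem.List.enumerate l).foldl
      (fun d p => d.modify p.2 ([] : List Int) (· ++ [p.1])) PySem.Dict.empty with hpos
  have hnd : pos.keys.Nodup := build_nodup _
  have hkeys : pos.keys = PySem.Set.ofList ((PySem.List.enumerate l).map (·.2)) := build_keys _
  have hkeys' : ∀ c, c ∈ pos.keys ↔ c ∈ l := by
    intro c
    rw [hkeys, PySem.List.map_snd_enumerate]
    exact PySem.Set.mem_ofList l c
  have hgetD : ∀ c, pos.getD c [] = idxsOf l c := by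
    intro c
    rw [hpos, build_getD, PySem.Dict.getD_empty]
    rfl
  rw [PySem.Dict.items_eq_map_keys pos hnd ([] : List Int), List.foldl_map]
  have hfun : (fun (res : List String) (k : String) => pvFillB (k, pos.getD k []).1 0 (k, pos.getD k []).2 res)
      = fun res k => pvFillB k 0 (idxsOf l k) res := by
    funext res k
    simp [hgetD k]
  rw [hfun]
  apply List.ext_getElem
  · have h1 : ∀ (ns : List String) (res : List String),
        (ns.foldl (fun r c => pvFillB c 0 (idxsOf l c) r) res).length = res.length := by
      intro ns
      induction ns with
      | nil => intro res; rfl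
      | cons c ns ih => intro res; rw [List.foldl_cons, ih, pvFillB_length]
    rw [h1]
    simp [refList]
  · intro i h1 h2
    have hi : i < l.length := by
      have h3 := h2
      simp only [refList, List.length_map, List.length_range] at h3
      exact h3
    have hres : (List.replicate l.length "").length = l.length := by simp
    have hfold := fold_fill l i hi pos.keys (List.replicate l.length "") hres
    have hmem : l.getD i "" ∈ pos.keys := by
      rw [hkeys' _, List.getD_eq_getElem l "" hi]
      exact List.getElem_mem hi
    rw [if_pos hmem] at hfold
    rw [← List.getD_eq_getElem _ "" h1, hfold]
    unfold refList
    rw [List.getElem_map, List.getElem_range]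

-- ===== VERDICT (by name: the statement is the Claim_ definition above) =====
theorem deviceNamesytem_spec : Claim_equal_deviceNamesytem := by
  intro l _
  unfold Spec_deviceNamesytem
  rw [a_eq_ref, b_eq_ref]
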